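-- pv_equiv track=rewrite | github.com/POlLLOGAMER/Network-of-Occurrences | Network of Ocurrences Manual Data.py | build_relation_network
-- ===== SOURCE A (Python) =====
-- def build_relation_network(corpus):
--     network = {}
--     for phrase in corpus:
--         words = phrase.split()
--         for i, word in enumerate(words):
--             if word not in network:
--                 network[word] = set()
--             # Connect to the previous and next words if they exist
--             if i > 0:
--                 network[word].add(words[i-1])
--             if i < len(words) - 1:
--                 network[word].add(words[i+1])
--     return network
-- ===== SOURCE B (Python) =====
-- def build_relation_network(corpus):
--     # Functional gather: list every word once (first-occurrence order), emit one
--     # flat symmetric edge stream, and build each word's neighbour set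
--     # independently by filtering that stream -- no incrementally mutated dict.
--     token_lists = [phrase.split() for phrase in corpus]
--     words = list(dict.fromkeys(w for ws in token_lists for w in ws))
--     edges = [e for ws in token_lists
--                for pair in zip(ws, ws[1:])
--                for e in (pair, pair[::-1])]
--     return {w: {b for a, b in edges if a == w} for w in words}
-- ===== Notes on version B (the rewrite author's own statement) =====
-- stated objective: alternative
-- what changed: Replaces A's single pass that mutates a dict of sets with indexed prev/next boundary checks by a mutation-free gather: dedup all words for the key order, materialise one flat symmetric edge stream from adjacent pairs, and build every word's neighbour set independently by filtering that stream.
import Mathlib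
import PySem

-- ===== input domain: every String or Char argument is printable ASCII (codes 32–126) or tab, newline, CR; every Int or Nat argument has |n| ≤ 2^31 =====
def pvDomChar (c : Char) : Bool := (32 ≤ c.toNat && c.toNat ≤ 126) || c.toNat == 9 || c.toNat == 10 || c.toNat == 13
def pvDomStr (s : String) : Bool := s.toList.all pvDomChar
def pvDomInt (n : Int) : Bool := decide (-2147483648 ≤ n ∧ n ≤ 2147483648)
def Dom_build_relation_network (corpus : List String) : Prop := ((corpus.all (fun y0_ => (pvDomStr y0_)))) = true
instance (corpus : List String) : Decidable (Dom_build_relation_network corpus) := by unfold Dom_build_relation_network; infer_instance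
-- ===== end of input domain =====

-- B replaces A's single mutating pass (dict of sets, indexed prev/next checks) by a mutation-free
-- gather: dedup the words for the key order, emit one flat symmetric edge stream, and build each
-- word's neighbour set independently by filtering that stream (alternative decomposition).

-- ===== PORT A =====
abbrev PVNet := PySem.Dict String (PySem.Set String)

-- body of A's inner loop over enumerate(words)
def pvBodyA (words : List String) (network : PVNet) (iw : Int × String) : PVNet :=
  let i := iw.1
  let word := iw.2
  let network := if network.contains word then network else network.insert word PySem.Set.empty
  let network :=
    if i > 0 then network.modify word PySem.Set.empty (fun s => s.add (PySem.List.pyGetD words (i - 1) ""))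
    else network
  if i < (words.length : Int) - 1 then
    network.modify word PySem.Set.empty (fun s => s.add (PySem.List.pyGetD words (i + 1) ""))
  else network

def build_relation_network (corpus : List String) : List (String × List String) :=
  (corpus.foldl (fun network phrase =>
      let words := PySem.Str.split₀ phrase
      (PySem.List.enumerate words).foldl (pvBodyA words) network)
    PySem.Dict.empty).items

-- ===== PORT B =====
-- token_lists = [phrase.split() for phrase in corpus]
-- words = list(dict.fromkeys(...))  →  PySem.List.dedup
-- edges: per adjacent pair, the pair and its reverse (pair[::-1] on a 2-tuple = swap)
-- the set comprehension {b for a, b in edges if a == w} is a fold of Set.add over the filtered stream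
def build_relation_network_alt (corpus : List String) : List (String × List String) :=
  let tokenLists := corpus.map PySem.Str.split₀
  let words := PySem.List.dedup tokenLists.flatten
  let edges := tokenLists.flatMap (fun ws =>
    (ws.zip (PySem.List.slice ws (some 1) none)).flatMap (fun pair => [pair, (pair.2, pair.1)]))
  words.map (fun w =>
    (w, (edges.filter (fun e => e.1 == w)).foldl (fun s e => PySem.Set.add s e.2) PySem.Set.empty))

-- ===== PRECONDITION & SPEC =====
def Spec_build_relation_network (corpus : List String) (out : List (String × List String)) : Prop := out = build_relation_network_alt corpus
instance (corpus : List String) (out : List (String × List String)) : Decidable (Spec_build_relation_network corpus out) := by unfold Spec_build_relation_network; infer_instance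

-- ===== CLAIM (what is proved, stated in full; the proofs are below) =====
def Claim_equal_build_relation_network : Prop := ∀ (corpus : List String), Dom_build_relation_network corpus → Spec_build_relation_network corpus (build_relation_network corpus)

-- ===== LEMMAS AND PROOFS =====

-- the per-word "next neighbour" contribution to key k
def pvNext (k cur : String) (rest : List String) : List String :=
  match rest with
  | [] => []
  | r :: _ => if cur = k then [r] else []

-- the per-phrase sequence of values A adds to the set of key k, written pair-wise
def pvH (k : String) : String → List String → List String
  | _, [] => []
  | p, v :: rest => (if p = k then [v] else []) ++ (if v = k then [p] else []) ++ pvH k v rest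

def pvSeqB (k : String) : List String → List String
  | [] => []
  | w :: rest => pvH k w rest

-- A's per-phrase sequence of values added to the set of key k (prev-then-next per word)
def pvHA (k : String) : Option String → List String → List String
  | _, [] => []
  | prev, cur :: rest =>
      (match prev with | some p => if cur = k then [p] else [] | none => []) ++
      pvNext k cur rest ++ pvHA k (some cur) rest

lemma pvHA_some (k : String) : ∀ (rest : List String) (cur : String),
    pvNext k cur rest ++ pvHA k (some cur) rest = pvH k cur rest := by
  intro rest
  induction rest with
  | nil => intro cur; rfl
  | cons x xs ih =>
    intro cur
    rw [pvH, ← ih x, pvHA]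
    simp [pvNext]

lemma pvHA_none (k : String) (ws : List String) : pvHA k none ws = pvSeqB k ws := by
  cases ws with
  | nil => rfl
  | cons w rest => simpa [pvHA, pvSeqB] using pvHA_some k rest w

-- one step of A's inner loop, effect on the set stored at k
lemma pvBodyA_getD (k : String) (pre : List String) (cur : String) (rest : List String) (d : PVNet) :
    (pvBodyA (pre ++ cur :: rest) d ((pre.length : Int), cur)).getD k PySem.Set.empty
      = (((match pre.getLast? with | some p => if cur = k then [p] else [] | none => []) ++
          pvNext k cur rest)).foldl PySem.Set.add (d.getD k PySem.Set.empty) := by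
  have hn1 : ∀ x, ((if d.contains x then d else d.insert x ([] : PySem.Set String))).getD k ([] : PySem.Set String)
      = d.getD k ([] : PySem.Set String) := by
    intro x
    by_cases hc : d.contains x = true
    · simp [hc]
    · rw [if_neg hc, PySem.Dict.getD_insert]
      by_cases hx : k = x
      · rw [if_pos hx]; subst hx
        exact (PySem.Dict.getD_of_not_contains d _ (by simpa using hc)).symm
      · rw [if_neg hx]
  by_cases hpre : pre = []
  · subst hpre
    cases rest with
    | nil =>
      simp only [pvBodyA, List.length_nil, List.nil_append, List.getLast?_nil, pvNext]
      norm_num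
      exact hn1 cur
    | cons r rs =>
      have hnext : PySem.List.pyGetD (cur :: r :: rs) (1 : Int) "" = r := by
        rw [show ((1 : Int)) = ((1 : Nat) : Int) from rfl, PySem.List.pyGetD_natCast]
        rfl
      simp only [pvBodyA, List.nil_append, List.length_nil, List.getLast?_nil, pvNext]
      have hg1 : ¬ ((0 : Int) > 0) := by norm_num
      have hg2 : (0 : Int) < ((cur :: r :: rs).length : Int) - 1 := by
        push_cast [List.length_cons]; omega
      simp only [Nat.cast_zero, hg1, if_false, hg2, if_true, PySem.Dict.getD_modify]
      by_cases hk : k = cur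
      · subst hk; simp [hnext, hn1]
      · simp [hk, hn1, Ne.symm hk]
  · obtain ⟨p, hgl⟩ : ∃ p, pre.getLast? = some p := by
      cases h : pre.getLast? with
      | none => exact absurd (List.getLast?_eq_none_iff.mp h) hpre
      | some p => exact ⟨p, rfl⟩
    have hlpos : 0 < pre.length := List.length_pos_of_ne_nil hpre
    have hprev : PySem.List.pyGetD (pre ++ cur :: rest) ((pre.length : Int) - 1) "" = p := by
      rw [show ((pre.length : Int) - 1) = ((pre.length - 1 : Nat) : Int) by omega,
        PySem.List.pyGetD_natCast, List.getD_eq_getElem?_getD,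
        List.getElem?_append_left (by omega), ← List.getLast?_eq_getElem?, hgl]
      rfl
    have hg1 : ((pre.length : Int)) > 0 := by exact_mod_cast hlpos
    cases rest with
    | nil =>
      have hg2 : ¬ ((pre.length : Int) < ((pre ++ [cur]).length : Int) - 1) := by
        push_cast [List.length_append, List.length_cons, List.length_nil]; omega
      simp only [pvBodyA, hgl, pvNext, hg1, if_true, hg2, if_false, hprev,
        PySem.Dict.getD_modify]
      by_cases hk : k = cur
      · subst hk; simp [hn1]
      · simp [hk, hn1, Ne.symm hk]
    | cons r rs =>
      have hnext : PySem.List.pyGetD (pre ++ cur :: r :: rs) ((pre.length : Int) + 1) "" = r := by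
        rw [show ((pre.length : Int) + 1) = ((pre.length + 1 : Nat) : Int) by omega,
          PySem.List.pyGetD_natCast, List.getD_eq_getElem?_getD,
          List.getElem?_append_right (by omega)]
        simp
      have hg2 : ((pre.length : Int)) < ((pre ++ cur :: r :: rs).length : Int) - 1 := by
        push_cast [List.length_append, List.length_cons]; omega
      simp only [pvBodyA, hgl, pvNext, hg1, if_true, hg2, if_true, hprev, hnext,
        PySem.Dict.getD_modify]
      by_cases hk : k = cur
      · subst hk; simp [hn1]
      · simp [hk, hn1, Ne.symm hk]

lemma pvStepA_getD (k : String) : ∀ (t pre : List String) (d : PVNet),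
    ((PySem.List.enumerate t (pre.length : Int)).foldl (pvBodyA (pre ++ t)) d).getD k PySem.Set.empty
      = (pvHA k pre.getLast? t).foldl PySem.Set.add (d.getD k PySem.Set.empty) := by
  intro t
  induction t with
  | nil => intro pre d; simp [pvHA, PySem.List.enumerate]
  | cons cur rest ih =>
    intro pre d
    rw [PySem.List.enumerate_cons, List.foldl_cons]
    have h2 : pre ++ cur :: rest = (pre ++ [cur]) ++ rest := by simp
    have h3 : ((pre.length : Int) + 1) = (((pre ++ [cur]).length : Nat) : Int) := by simp
    rw [h2, h3, ih, List.getLast?_concat, ← h2, pvBodyA_getD]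
    cases hgl : pre.getLast? <;> simp [pvHA, List.foldl_append]

lemma pvA_getD (k : String) : ∀ (corpus : List String) (d : PVNet),
    ((corpus.foldl (fun network phrase =>
        (PySem.List.enumerate (PySem.Str.split₀ phrase)).foldl (pvBodyA (PySem.Str.split₀ phrase)) network) d)).getD k PySem.Set.empty
      = (corpus.flatMap (fun p => pvSeqB k (PySem.Str.split₀ p))).foldl PySem.Set.add (d.getD k PySem.Set.empty) := by
  intro corpus
  induction corpus with
  | nil => intro d; simp
  | cons p ps ih =>
    intro d
    rw [List.foldl_cons, List.flatMap_cons, List.foldl_append, ih]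
    congr 1
    have := pvStepA_getD k (PySem.Str.split₀ p) [] d
    simpa [pvHA_none] using this

-- keys of A's dict
lemma pvBodyA_keys (ws : List String) (d : PVNet) (iw : Int × String) :
    (pvBodyA ws d iw).keys = PySem.Set.add d.keys iw.2 := by
  rcases iw with ⟨i, w⟩
  have hs1 : ((if d.contains w then d else d.insert w PySem.Set.empty)).keys = PySem.Set.add d.keys w := by
    by_cases hc : d.contains w = true
    · rw [if_pos hc, PySem.Set.add_of_mem ((PySem.Dict.contains_iff_mem_keys d w).mp hc)]
    · rw [if_neg hc, PySem.Dict.keys_insert_of_not_contains d _ (by simpa using hc),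
        PySem.Set.add_of_not_mem (fun hm => hc ((PySem.Dict.contains_iff_mem_keys d w).mpr hm))]
  have hs1c : ((if d.contains w then d else d.insert w PySem.Set.empty)).contains w = true := by
    by_cases hc : d.contains w = true
    · rw [if_pos hc]; exact hc
    · rw [if_neg hc]; exact PySem.Dict.contains_insert_self d w _
  have hmod : ∀ (m : PVNet) (f : PySem.Set String → PySem.Set String), m.contains w = true →
      (m.modify w PySem.Set.empty f).keys = m.keys ∧ (m.modify w PySem.Set.empty f).contains w = true := by
    intro m f hc
    have hk := PySem.Dict.keys_modify m w PySem.Set.empty f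
    rw [PySem.Dict.keys_insert_of_contains m _ hc] at hk
    refine ⟨hk, ?_⟩
    rw [PySem.Dict.contains_iff_mem_keys, hk, ← PySem.Dict.contains_iff_mem_keys]
    exact hc
  simp only [pvBodyA]
  set m := (if d.contains w then d else d.insert w PySem.Set.empty) with hm
  split_ifs with h1 h2 h2
  · rw [((hmod _ _ ((hmod _ _ hs1c).2)).1), ((hmod _ _ hs1c).1), hs1]
  · rw [((hmod _ _ hs1c).1), hs1]
  · rw [((hmod _ _ hs1c).1), hs1]
  · exact hs1

lemma pvStepA_keys (ws : List String) : ∀ (l : List (Int × String)) (d : PVNet),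
    (l.foldl (pvBodyA ws) d).keys = PySem.Set.update d.keys (l.map Prod.snd) := by
  intro l
  induction l with
  | nil => intro d; rw [List.foldl_nil, List.map_nil, PySem.Set.update_nil]
  | cons iw l ih =>
    intro d
    rw [List.foldl_cons, ih, pvBodyA_keys, List.map_cons, PySem.Set.update_cons]

lemma pvA_keys : ∀ (corpus : List String) (d : PVNet),
    ((corpus.foldl (fun network phrase =>
        (PySem.List.enumerate (PySem.Str.split₀ phrase)).foldl (pvBodyA (PySem.Str.split₀ phrase)) network) d)).keys
      = corpus.foldl (fun ks p => PySem.Set.update ks (PySem.Str.split₀ p)) d.keys := by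
  intro corpus
  induction corpus with
  | nil => intro d; rfl
  | cons p ps ih =>
    intro d
    rw [List.foldl_cons, List.foldl_cons, ih, pvStepA_keys, PySem.List.map_snd_enumerate]

lemma pvKeys_nodup : ∀ (corpus : List String) (ks : PySem.Set String), ks.Nodup →
    (corpus.foldl (fun ks p => PySem.Set.update ks (PySem.Str.split₀ p)) ks).Nodup := by
  intro corpus
  induction corpus with
  | nil => intro ks h; exact h
  | cons p ps ih =>
    intro ks h
    exact ih _ (PySem.Set.nodup_update _ _ h)

-- A's key sequence equals B's deduped word list
lemma pvKeys_eq_dedup : ∀ (corpus : List String) (ks : PySem.Set String),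
    corpus.foldl (fun ks p => PySem.Set.update ks (PySem.Str.split₀ p)) ks
      = ((corpus.map PySem.Str.split₀).flatten).foldl PySem.Set.add ks := by
  intro corpus
  induction corpus with
  | nil => intro ks; rfl
  | cons p ps ih =>
    intro ks
    rw [List.foldl_cons, List.map_cons, List.flatten_cons, List.foldl_append, ih]
    rfl

-- filter distributes over flatMap
lemma pvFilter_flatMap {α β : Type} (f : α → List β) (p : β → Bool) : ∀ (l : List α),
    (l.flatMap f).filter p = l.flatMap (fun x => (f x).filter p) := by
  intro l
  induction l with
  | nil => rfl
  | cons x xs ih => rw [List.flatMap_cons, List.flatMap_cons, List.filter_append, ih]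

-- per-phrase: filtering B's symmetric pair stream for key k, taking seconds, is pvSeqB k
lemma pvZip_filter (k : String) : ∀ (ws : List String),
    (((ws.zip ws.tail).flatMap (fun pair => [pair, (pair.2, pair.1)])).filter
        (fun e => e.1 == k)).map Prod.snd
      = pvSeqB k ws := by
  have step : ∀ (ws : List String),
      ((ws.zip ws.tail).flatMap (fun ab =>
        ((([ab, (ab.2, ab.1)] : List (String × String)).filter (fun e => e.1 == k)).map Prod.snd)))
        = pvSeqB k ws := by
    intro ws
    induction ws with
    | nil => rfl
    | cons w tl ih =>
      cases tl with
      | nil => rfl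
      | cons v rs =>
        simp only [List.tail_cons, List.zip_cons_cons, List.flatMap_cons, pvSeqB, pvH]
        simp only [List.tail_cons, pvSeqB] at ih
        rw [← ih]
        congr 1
        by_cases h1 : w = k <;> by_cases h2 : v = k <;>
          simp [List.filter, beq_eq_decide, h1, h2]
  intro ws
  rw [pvFilter_flatMap, List.map_flatMap]
  exact step ws

-- corpus-level: B's filtered edge stream for key k, taking seconds, is A's added-value stream
lemma pvEdges_filter (k : String) (corpus : List String) :
    (((corpus.map PySem.Str.split₀).flatMap (fun ws =>
        (ws.zip (PySem.List.slice ws (some 1) none)).flatMap (fun pair => [pair, (pair.2, pair.1)]))).filter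
          (fun e => e.1 == k)).map Prod.snd
      = corpus.flatMap (fun p => pvSeqB k (PySem.Str.split₀ p)) := by
  have hslice : ∀ ws : List String, PySem.List.slice ws (some 1) none = ws.tail := by
    intro ws; simp [pysem]
  simp only [hslice]
  rw [pvFilter_flatMap, List.map_flatMap, List.flatMap_map]
  refine List.flatMap_congr (fun p _ => ?_)
  exact pvZip_filter k (PySem.Str.split₀ p)

-- ===== VERDICT (by name: the statement is the Claim_ definition above) =====
theorem build_relation_network_spec : Claim_equal_build_relation_network := by
  intro corpus _
  unfold Spec_build_relation_network build_relation_network build_relation_network_alt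
  set dA := corpus.foldl (fun network phrase =>
      (PySem.List.enumerate (PySem.Str.split₀ phrase)).foldl (pvBodyA (PySem.Str.split₀ phrase)) network)
    PySem.Dict.empty with hdA
  have hKA : dA.keys = corpus.foldl (fun ks p => PySem.Set.update ks (PySem.Str.split₀ p)) [] := by
    rw [hdA, pvA_keys]; rfl
  have nodupA : dA.keys.Nodup := by
    rw [hKA]; exact pvKeys_nodup corpus [] List.nodup_nil
  rw [PySem.Dict.items_eq_map_keys dA nodupA PySem.Set.empty]
  have hkeys : dA.keys = PySem.List.dedup ((corpus.map PySem.Str.split₀).flatten) := by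
    rw [hKA, pvKeys_eq_dedup, PySem.List.dedup_eq_ofList, PySem.Set.ofList_eq_foldl]
  rw [hkeys]
  refine List.map_congr_left (fun k _ => ?_)
  congr 1
  rw [List.foldl_map (f := Prod.snd) (g := PySem.Set.add) |>.symm]
  rw [pvEdges_filter k corpus, hdA, pvA_getD]
  rfl
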